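-- pv_equiv track=rewrite | github.com/kacper38/Rosalind_problems | to_12_2020/overlap_graphs.py | adjacency_list_generato
-- ===== SOURCE A (Python) =====
-- from itertools import groupby, combinations
--
-- def is_overlap(k1,k2):
--     return k1[-3:] == k2[:3]
--
-- def adjacency_list_generato ( fd ):
--     list1 = []
--     for k1, k2 in combinations(fd,2):
--         temp1, temp2 = fd.get(k1), fd.get(k2)
--         if is_overlap(temp1,temp2):
--             list1.append(str(k1) + " " + str(k2))
--         if is_overlap(temp2,temp1):
--             list1.append(str(k2) + " " + str(k1))
--     return(list1)
-- ===== SOURCE B (Python) =====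
-- def adjacency_list_generato(fd):
--     # Index nodes by 3-char prefix/suffix, then for each node merge the two
--     # sorted match lists, instead of testing every pair.
--     pref = {}
--     suf = {}
--     for j, (k, v) in enumerate(fd.items()):
--         pref.setdefault(v[:3], []).append((j, k))
--         suf.setdefault(v[-3:], []).append((j, k))
--     out = []
--     for i, (k, v) in enumerate(fd.items()):
--         fwd = pref.get(v[-3:], [])
--         bwd = suf.get(v[:3], [])
--         p = 0
--         while p < len(fwd) and fwd[p][0] <= i:
--             p += 1
--         q = 0
--         while q < len(bwd) and bwd[q][0] <= i:
--             q += 1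
--         while p < len(fwd) or q < len(bwd):
--             if q == len(bwd) or (p < len(fwd) and fwd[p][0] <= bwd[q][0]):
--                 out.append(k + " " + fwd[p][1])
--                 p += 1
--             else:
--                 out.append(bwd[q][1] + " " + k)
--                 q += 1
--     return out
-- ===== Notes on version B (the rewrite author's own statement) =====
-- stated objective: faster
-- what changed: Instead of testing all O(n^2) key pairs, B indexes the sequences by 3-char prefix and by 3-char suffix in two dicts built in one pass, and for each node merges its two sorted match lists (suffix-matches and prefix-matches) by position to reproduce A's pair order exactly.
import Mathlib
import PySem

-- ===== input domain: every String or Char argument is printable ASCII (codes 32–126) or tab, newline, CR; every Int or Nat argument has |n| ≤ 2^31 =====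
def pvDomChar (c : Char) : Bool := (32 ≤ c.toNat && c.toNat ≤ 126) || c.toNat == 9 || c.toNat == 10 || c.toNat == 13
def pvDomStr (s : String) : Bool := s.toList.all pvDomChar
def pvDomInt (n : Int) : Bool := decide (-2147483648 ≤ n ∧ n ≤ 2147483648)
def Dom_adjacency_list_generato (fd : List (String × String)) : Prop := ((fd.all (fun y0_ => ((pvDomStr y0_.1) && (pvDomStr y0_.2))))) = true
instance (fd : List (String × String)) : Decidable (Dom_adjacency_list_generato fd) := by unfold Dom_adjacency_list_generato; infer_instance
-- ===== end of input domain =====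

-- B replaces A's all-pairs scan by two prefix/suffix hash indexes plus per-node sorted-position merges; measurably faster.

-- ===== PORT A =====
-- is_overlap(k1, k2): k1[-3:] == k2[:3]
def is_overlap (k1 k2 : String) : Bool :=
  PySem.Str.slice k1 (some (-3)) none == PySem.Str.slice k2 none (some 3)

-- combinations(xs, 2) in Python's iteration order
def pvComb2 {α : Type} : List α → List (α × α)
  | [] => []
  | x :: rest => rest.map (fun y => (x, y)) ++ pvComb2 rest

def adjacency_list_generato (fd : List (String × String)) : List String :=
  (pvComb2 (fd.map Prod.fst)).foldl (fun list1 kk =>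
    -- temp1, temp2 = fd.get(k1), fd.get(k2); both keys come from fd itself, so get never misses
    let temp1 := ((PySem.Dict.mk fd).get? kk.1).getD ""
    let temp2 := ((PySem.Dict.mk fd).get? kk.2).getD ""
    let l1 := if is_overlap temp1 temp2 then list1 ++ [kk.1 ++ " " ++ kk.2] else list1
    if is_overlap temp2 temp1 then l1 ++ [kk.2 ++ " " ++ kk.1] else l1) []

-- ===== PORT B =====
-- the two 'while … : p += 1' skip loops of Source B
def pvSkipLe (i : Int) : List (Int × String) → List (Int × String)
  | [] => []
  | a :: rest => if a.1 ≤ i then pvSkipLe i rest else a :: rest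

-- the final merge loop of Source B ('while p < len(fwd) or q < len(bwd): …')
def pvMerge (k : String) : List (Int × String) → List (Int × String) → List String
  | [], [] => []
  | a :: fs, [] => (k ++ " " ++ a.2) :: pvMerge k fs []
  | [], b :: bs => (b.2 ++ " " ++ k) :: pvMerge k [] bs
  | a :: fs, b :: bs =>
      if a.1 ≤ b.1 then (k ++ " " ++ a.2) :: pvMerge k fs (b :: bs)
      else (b.2 ++ " " ++ k) :: pvMerge k (a :: fs) bs

def adjacency_list_generato_alt (fd : List (String × String)) : List String :=
  let pref := (PySem.List.enumerate fd).foldl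
    (fun d q => d.modify (PySem.Str.slice q.2.2 none (some 3)) [] (· ++ [(q.1, q.2.1)]))
    PySem.Dict.empty
  let suf := (PySem.List.enumerate fd).foldl
    (fun d q => d.modify (PySem.Str.slice q.2.2 (some (-3)) none) [] (· ++ [(q.1, q.2.1)]))
    PySem.Dict.empty
  (PySem.List.enumerate fd).foldl (fun out q =>
    out ++ pvMerge q.2.1
      (pvSkipLe q.1 (pref.getD (PySem.Str.slice q.2.2 (some (-3)) none) []))
      (pvSkipLe q.1 (suf.getD (PySem.Str.slice q.2.2 none (some 3)) []))) []

-- ===== PRECONDITION & SPEC =====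
-- Pre_ excludes association lists with duplicate keys: such a list does not represent a Python
-- dict input (dict construction deduplicates it, so A never iterates the duplicated list itself).
def Pre_adjacency_list_generato (fd : List (String × String)) : Prop :=
  (fd.map Prod.fst).Nodup

instance (fd : List (String × String)) : Decidable (Pre_adjacency_list_generato fd) := by
  unfold Pre_adjacency_list_generato; infer_instance

def pvWitness_adjacency_list_generato : (List (String × String)) :=
  [("Rosalind_0498", "AAATAAA"), ("Rosalind_2391", "AAATTTT"), ("Rosalind_0442", "AAATCCC")]

def Spec_adjacency_list_generato (fd : List (String × String)) (out : List String) : Prop := out = adjacency_list_generato_alt fd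
instance (fd : List (String × String)) (out : List String) : Decidable (Spec_adjacency_list_generato fd out) := by unfold Spec_adjacency_list_generato; infer_instance

-- ===== CLAIM (what is proved, stated in full; the proofs are below) =====
def Claim_equal_adjacency_list_generato : Prop := ∀ (fd : List (String × String)), Dom_adjacency_list_generato fd → Pre_adjacency_list_generato fd → Spec_adjacency_list_generato fd (adjacency_list_generato fd)

-- ===== LEMMAS AND PROOFS =====

-- the canonical form both ports are reduced to: for every earlier/later pair, the two possible edges
def pvCanon : List (String × String) → List String
  | [] => []
  | (k, v) :: rest =>
      rest.flatMap (fun q =>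
        (if is_overlap v q.2 then [k ++ " " ++ q.1] else []) ++
        (if is_overlap q.2 v then [q.1 ++ " " ++ k] else [])) ++ pvCanon rest

theorem pvFlatMapCongr {α β : Type} (l : List α) (f g : α → List β)
    (h : ∀ x ∈ l, f x = g x) : l.flatMap f = l.flatMap g := by
  induction l with
  | nil => rfl
  | cons x l ih =>
    simp only [List.flatMap_cons, h x (List.mem_cons_self ..),
      ih (fun y hy => h y (List.mem_cons_of_mem _ hy))]

-- ---- A's fold equals pvCanon ----

theorem pvA_seg (D : List (String × String)) (k v : String) (rest : List (String × String))
    (acc : List String)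
    (hk : ((PySem.Dict.mk D).get? k).getD "" = v)
    (h : ∀ p ∈ rest, ((PySem.Dict.mk D).get? p.1).getD "" = p.2) :
    ((rest.map Prod.fst).map (fun y => (k, y))).foldl (fun list1 kk =>
      let temp1 := ((PySem.Dict.mk D).get? kk.1).getD ""
      let temp2 := ((PySem.Dict.mk D).get? kk.2).getD ""
      let l1 := if is_overlap temp1 temp2 then list1 ++ [kk.1 ++ " " ++ kk.2] else list1
      if is_overlap temp2 temp1 then l1 ++ [kk.2 ++ " " ++ kk.1] else l1) acc
    = acc ++ rest.flatMap (fun q =>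
        (if is_overlap v q.2 then [k ++ " " ++ q.1] else []) ++
        (if is_overlap q.2 v then [q.1 ++ " " ++ k] else [])) := by
  induction rest generalizing acc with
  | nil => simp
  | cons q rest ih =>
    have hq : ((PySem.Dict.mk D).get? q.1).getD "" = q.2 := h q (List.mem_cons_self ..)
    simp only [List.map_cons, List.foldl_cons, List.flatMap_cons]
    rw [ih _ (fun p hp => h p (List.mem_cons_of_mem _ hp))]
    simp only [hk, hq]
    by_cases h1 : is_overlap v q.2 <;> by_cases h2 : is_overlap q.2 v <;>
      simp [h1, h2]

theorem pvA_fold (D : List (String × String)) (l : List (String × String)) (acc : List String)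
    (h : ∀ p ∈ l, ((PySem.Dict.mk D).get? p.1).getD "" = p.2) :
    (pvComb2 (l.map Prod.fst)).foldl (fun list1 kk =>
      let temp1 := ((PySem.Dict.mk D).get? kk.1).getD ""
      let temp2 := ((PySem.Dict.mk D).get? kk.2).getD ""
      let l1 := if is_overlap temp1 temp2 then list1 ++ [kk.1 ++ " " ++ kk.2] else list1
      if is_overlap temp2 temp1 then l1 ++ [kk.2 ++ " " ++ kk.1] else l1) acc
    = acc ++ pvCanon l := by
  induction l generalizing acc with
  | nil => simp [pvComb2, pvCanon]
  | cons p rest ih =>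
    obtain ⟨k, v⟩ := p
    simp only [List.map_cons, pvComb2, List.foldl_append, pvCanon]
    rw [pvA_seg D k v rest acc (h (k, v) (List.mem_cons_self ..))
        (fun p hp => h p (List.mem_cons_of_mem _ hp))]
    rw [ih _ (fun p hp => h p (List.mem_cons_of_mem _ hp))]
    simp [List.append_assoc]

theorem pvA_lookup (fd : List (String × String)) (hnd : (fd.map Prod.fst).Nodup)
    (p : String × String) (hp : p ∈ fd) :
    ((PySem.Dict.mk fd).get? p.1).getD "" = p.2 := by
  have : (PySem.Dict.mk fd).get? p.1 = some p.2 := by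
    apply PySem.Dict.get?_of_mem_items
    · exact hp
    · simpa [PySem.Dict.keys] using hnd
  simp [this]

theorem pvA_eq_canon (fd : List (String × String)) (h : Pre_adjacency_list_generato fd) :
    adjacency_list_generato fd = pvCanon fd := by
  unfold adjacency_list_generato
  exact pvA_fold fd fd [] (fun p hp => pvA_lookup fd h p hp)

-- ---- B's folds equal pvCanon ----

theorem pvGetD_buildIdx {α κ : Type} [BEq κ] [LawfulBEq κ]
    (l : List α) (key : α → κ) (val : α → Int × String) (c : κ) :
    ((l.foldl (fun d q => d.modify (key q) [] (· ++ [val q])) PySem.Dict.empty).getD c [])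
    = (l.filter (fun q => key q == c)).map val := by
  have h1 := PySem.Dict.getD_foldl_modify_append
    (l := l.map (fun q => (key q, val q))) (d := PySem.Dict.empty) (c := c)
  rw [List.foldl_map] at h1
  simp only [] at h1
  rw [h1]
  simp [List.filter_map, Function.comp_def]

theorem pvSkipLe_eq_filter (i : Int) (L : List (Int × String))
    (hL : L.Pairwise (fun a b => a.1 < b.1)) :
    pvSkipLe i L = L.filter (fun a => decide (i < a.1)) := by
  induction L with
  | nil => rfl
  | cons a L ih =>
    rcases List.pairwise_cons.mp hL with ⟨ha, hL'⟩
    by_cases h : a.1 ≤ i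
    · simp [pvSkipLe, h, not_lt.mpr h, ih hL']
    · have hi : i < a.1 := not_le.mp h
      simp only [pvSkipLe, if_neg h, List.filter_cons, decide_eq_true_eq, hi, if_pos]
      rw [List.filter_eq_self.mpr (fun b hb => by
        simpa using lt_trans hi (ha b hb))]

theorem pvMerge_cons_right (k : String) (a : Int × String) (fs bs : List (Int × String))
    (h : ∀ x ∈ fs, a.1 < x.1) :
    pvMerge k fs (a :: bs) = (a.2 ++ " " ++ k) :: pvMerge k fs bs := by
  cases fs with
  | nil => simp [pvMerge]
  | cons x fs =>
    have : ¬ x.1 ≤ a.1 := not_le.mpr (h x (List.mem_cons_self ..))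
    simp [pvMerge, this]

theorem pvMerge_cons_left (k : String) (a : Int × String) (fs bs : List (Int × String))
    (h : ∀ x ∈ bs, a.1 < x.1) :
    pvMerge k (a :: fs) bs = (k ++ " " ++ a.2) :: pvMerge k fs bs := by
  cases bs with
  | nil => simp [pvMerge]
  | cons b bs =>
    have : a.1 ≤ b.1 := le_of_lt (h b (List.mem_cons_self ..))
    simp [pvMerge, this]

theorem pvMerge_filter (k : String) (L : List (Int × (String × String)))
    (hL : L.Pairwise (fun p q => p.1 < q.1))
    (P Q : Int × (String × String) → Bool) :
    pvMerge k ((L.filter P).map (fun q => (q.1, q.2.1)))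
              ((L.filter Q).map (fun q => (q.1, q.2.1)))
    = L.flatMap (fun q =>
        (if P q then [k ++ " " ++ q.2.1] else []) ++
        (if Q q then [q.2.1 ++ " " ++ k] else [])) := by
  induction L with
  | nil => simp [pvMerge]
  | cons q L ih =>
    rcases List.pairwise_cons.mp hL with ⟨hq, hL'⟩
    have hfs : ∀ x ∈ (L.filter P).map (fun q => (q.1, q.2.1)), (q.1 : Int) < x.1 := by
      intro x hx
      rcases List.mem_map.mp hx with ⟨r, hr, rfl⟩
      exact hq r (List.mem_of_mem_filter hr)
    have hbs : ∀ x ∈ (L.filter Q).map (fun q => (q.1, q.2.1)), (q.1 : Int) < x.1 := by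
      intro x hx
      rcases List.mem_map.mp hx with ⟨r, hr, rfl⟩
      exact hq r (List.mem_of_mem_filter hr)
    simp only [List.flatMap_cons, ← ih hL']
    by_cases h1 : P q <;> by_cases h2 : Q q <;>
      simp only [List.filter_cons, h1, h2, if_pos, if_neg, Bool.false_eq_true,
        not_false_iff, List.map_cons]
    · rw [show pvMerge k ((q.1, q.2.1) :: (L.filter P).map (fun q => (q.1, q.2.1)))
            ((q.1, q.2.1) :: (L.filter Q).map (fun q => (q.1, q.2.1)))
          = (k ++ " " ++ q.2.1) :: pvMerge k ((L.filter P).map (fun q => (q.1, q.2.1)))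
            ((q.1, q.2.1) :: (L.filter Q).map (fun q => (q.1, q.2.1))) by simp [pvMerge]]
      rw [pvMerge_cons_right k (q.1, q.2.1) _ _ hfs]
      simp
    · rw [pvMerge_cons_left k (q.1, q.2.1) _ _ hbs]
      simp
    · rw [pvMerge_cons_right k (q.1, q.2.1) _ _ hfs]
      simp
    · simp

-- per-pair emission of B, after all list machinery is removed
def pvF (q r : Int × (String × String)) : List String :=
  (if (PySem.Str.slice r.2.2 none (some 3) == PySem.Str.slice q.2.2 (some (-3)) none
       && decide (q.1 < r.1)) then [q.2.1 ++ " " ++ r.2.1] else []) ++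
  (if (PySem.Str.slice r.2.2 (some (-3)) none == PySem.Str.slice q.2.2 none (some 3)
       && decide (q.1 < r.1)) then [r.2.1 ++ " " ++ q.2.1] else [])

set_option maxHeartbeats 2000000 in
theorem pvB_flat (fd : List (String × String)) :
    adjacency_list_generato_alt fd
    = (PySem.List.enumerate fd).flatMap (fun q =>
        (PySem.List.enumerate fd).flatMap (fun r => pvF q r)) := by
  unfold adjacency_list_generato_alt
  simp only []
  rw [PySem.List.foldl_append_eq_flatMap]
  simp only [List.nil_append]
  apply pvFlatMapCongr
  intro q hq
  rw [pvGetD_buildIdx (PySem.List.enumerate fd)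
        (fun r => PySem.Str.slice r.2.2 none (some 3)) (fun r => (r.1, r.2.1))]
  rw [pvGetD_buildIdx (PySem.List.enumerate fd)
        (fun r => PySem.Str.slice r.2.2 (some (-3)) none) (fun r => (r.1, r.2.1))]
  rw [pvSkipLe_eq_filter _ _ (List.Pairwise.map _ (fun a b h => h)
        ((PySem.List.pairwise_lt_enumerate fd 0).filter _))]
  rw [pvSkipLe_eq_filter _ _ (List.Pairwise.map _ (fun a b h => h)
        ((PySem.List.pairwise_lt_enumerate fd 0).filter _))]
  rw [List.filter_map, List.filter_map, List.filter_filter, List.filter_filter]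
  rw [pvMerge_filter _ _ (PySem.List.pairwise_lt_enumerate fd 0)]
  apply pvFlatMapCongr
  intro r hr
  simp only [pvF, Function.comp_apply, Bool.and_comm]
  rfl

theorem pvF_pos (q r : Int × (String × String)) (h : q.1 < r.1) :
    pvF q r
    = (if is_overlap q.2.2 r.2.2 then [q.2.1 ++ " " ++ r.2.1] else []) ++
      (if is_overlap r.2.2 q.2.2 then [r.2.1 ++ " " ++ q.2.1] else []) := by
  have hd : decide (q.1 < r.1) = true := decide_eq_true h
  simp only [pvF, is_overlap, hd, Bool.and_true]
  rw [show (PySem.Str.slice r.2.2 none (some 3) == PySem.Str.slice q.2.2 (some (-3)) none)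
      = (PySem.Str.slice q.2.2 (some (-3)) none == PySem.Str.slice r.2.2 none (some 3)) from
      Bool.eq_iff_iff.mpr (by simp only [beq_iff_eq]; exact eq_comm)]
  rfl

theorem pvF_none (q r : Int × (String × String)) (h : ¬ q.1 < r.1) :
    pvF q r = [] := by
  have hd : decide (q.1 < r.1) = false := decide_eq_false h
  simp [pvF, hd]

theorem pvFstLB (xs : List (String × String)) (s : Int) (q : Int × (String × String))
    (hq : q ∈ PySem.List.enumerate xs s) : s ≤ q.1 := by
  rcases (PySem.List.mem_enumerate_iff ..).mp hq with ⟨k, hk, rfl⟩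
  simp

theorem pvFlatMapSnd (xs : List (String × String)) (s : Int) (g : String × String → List String) :
    (PySem.List.enumerate xs s).flatMap (fun r => g r.2) = xs.flatMap g := by
  induction xs generalizing s with
  | nil => simp [PySem.List.enumerate_nil]
  | cons x xs ih => simp only [PySem.List.enumerate_cons, List.flatMap_cons, ih]

theorem pvDouble (fd : List (String × String)) (s : Int) :
    (PySem.List.enumerate fd s).flatMap (fun q =>
      (PySem.List.enumerate fd s).flatMap (fun r => pvF q r))
    = pvCanon fd := by
  induction fd generalizing s with
  | nil => simp [PySem.List.enumerate_nil, pvCanon]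
  | cons p rest ih =>
    obtain ⟨k, v⟩ := p
    rw [PySem.List.enumerate_cons]
    simp only [List.flatMap_cons]
    rw [pvF_none _ _ (lt_irrefl s), List.nil_append]
    rw [pvFlatMapCongr (PySem.List.enumerate rest (s + 1)) _
      (fun r => (if is_overlap v r.2.2 then [k ++ " " ++ r.2.1] else []) ++
                (if is_overlap r.2.2 v then [r.2.1 ++ " " ++ k] else []))
      (fun r hr => pvF_pos (s, (k, v)) r (by have := pvFstLB rest (s + 1) r hr; omega))]
    rw [pvFlatMapCongr (PySem.List.enumerate rest (s + 1))
      (fun q => pvF q (s, (k, v)) ++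
        (PySem.List.enumerate rest (s + 1)).flatMap (fun r => pvF q r))
      (fun q => (PySem.List.enumerate rest (s + 1)).flatMap (fun r => pvF q r))
      (fun q hq => by
        have h0 : pvF q (s, (k, v)) = [] :=
          pvF_none q (s, (k, v)) (by have := pvFstLB rest (s + 1) q hq; simp; omega)
        simp only [h0, List.nil_append])]
    rw [ih (s + 1)]
    rw [pvFlatMapSnd rest (s + 1)
      (fun q => (if is_overlap v q.2 then [k ++ " " ++ q.1] else []) ++
                (if is_overlap q.2 v then [q.1 ++ " " ++ k] else []))]
    simp [pvCanon]

theorem pvB_eq_canon (fd : List (String × String)) :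
    adjacency_list_generato_alt fd = pvCanon fd :=
  (pvB_flat fd).trans (pvDouble fd 0)

-- ===== VERDICT (by name: the statement is the Claim_ definition above) =====
theorem adjacency_list_generato_spec : Claim_equal_adjacency_list_generato := by
  intro fd _ hpre
  unfold Spec_adjacency_list_generato
  rw [pvA_eq_canon fd hpre, pvB_eq_canon fd]
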